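-- pv_equiv track=rewrite | github.com/dvirsarig/Course-Projects | Projects/Python - BoggleGame/ex11_utils.py | _get_score_in_n_size_at_board1
-- ===== SOURCE A (Python) =====
-- from typing import List, Tuple, Iterable, Optional
--
-- Board = List[List[str]]
--
-- DIRECTIONS = {(1, 0), (0, 1), (1, 1), (-1, 0), (0, -1), (-1, -1), (-1, 1), (1, -1)}
--
-- def coordinate_outside_of_board(row: int, col: int, board: Board) -> bool:
--     '''Return if row, col not in board borders'''
--     if (row < 0) or (row >= len(board)):
--         return True
--     if (col < 0) or (col >= len(board[0])):
--         return True
--     return False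
--
-- def _get_score_in_n_size_at_board1(n: int, board: Board, words: set[str], partial_words: set[str],
--                                    taken_words: set[str]) -> int:
--     '''Helper function to get_score that return the score for n size paths'''
--     score = 0
--     # Run for any starting point in board
--     for start_row in range(len(board)):
--         for start_col in range(len(board[0])):
--             path_set = {(start_row, start_col)}  # Use this set to speed up the code
--             # For any starting point add all paths
--             score += _helper_get_score_in_n_size_at_board1(n - 1, board, path_set, start_row, start_col, partial_words,
--                                                            words,
--                                                            '', taken_words, 1)
--     return score
--
-- def _helper_get_score_in_n_size_at_board1(n: int, board: Board, path_set: set[Tuple[int, int]], row: int,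
--                                           col: int,
--                                           partial_words: set[str],
--                                           words: set[str], word: str,
--                                           taken_words: set[str], score: int) -> int:
--     '''An helper function that insert to moves_list all the valid path in starting location'''
--     if coordinate_outside_of_board(row, col, board):
--         return 0
--     word += board[row][col]  # update word
--     if n == 0:  # if we finish the path
--         if word not in taken_words:
--             if word in words:  # if final word in valid words
--                 taken_words.add(word)
--                 return score ** 2
--         return 0
--     if word not in partial_words:  # if word isn't possible to complete finish
--         return 0
--
--     score += 1
--     sum = 0
--     n -= 1  # counter
--     for direction in DIRECTIONS:  # check for any direction
--         # update coordinates
--         new_row = row + direction[0]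
--         new_col = col + direction[1]
--         coordinate = (new_row, new_col)
--
--         # Thw path can't repeat itself
--         if coordinate not in path_set:
--             coordinate = (new_row, new_col)
--             path_set.add(coordinate)
--
--             # Move in direction
--             sum += _helper_get_score_in_n_size_at_board1(n, board, path_set, new_row, new_col, partial_words, words,
--                                                          word,
--                                                          taken_words, score)
--
--             # reset for next direction
--             path_set.remove(coordinate)
--     return sum
-- ===== SOURCE B (Python) =====
-- from typing import List, Tuple
--
-- Board = List[List[str]]
--
-- DIRECTIONS = {(1, 0), (0, 1), (1, 1), (-1, 0), (0, -1), (-1, -1), (-1, 1), (1, -1)}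
--
--
-- def _get_score_in_n_size_at_board1(n: int, board: Board, words: set, partial_words: set,
--                                    taken_words: set) -> int:
--     '''Breadth-first: grow all simple paths level by level (pruning prefixes not in
--     partial_words), then score each distinct new length-n valid word with n ** 2.'''
--     if n < 1:
--         return 0
--     rows = len(board)
--     cols = len(board[0]) if board else 0
--     # level 1: one item per start cell: (position, path so far, word so far)
--     frontier = [((r, c), ((r, c),), board[r][c])
--                 for r in range(rows) for c in range(cols)]
--     # grow the paths n - 1 times (stop early once no path can be extended)
--     for _ in range(n - 1):
--         if not frontier:
--             break
--         nxt = []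
--         for (r, c), path, word in frontier:
--             if word not in partial_words:
--                 continue
--             for dr, dc in DIRECTIONS:
--                 nr, nc = r + dr, c + dc
--                 if 0 <= nr < rows and 0 <= nc < cols and (nr, nc) not in path:
--                     nxt.append(((nr, nc), path + ((nr, nc),), word + board[nr][nc]))
--         frontier = nxt
--     # score pass: each distinct valid word not already taken earns n ** 2
--     new = []
--     for _, _, word in frontier:
--         if word in words and word not in taken_words and word not in new:
--             new.append(word)
--     for w in new:
--         taken_words.add(w)
--     return len(new) * n * n
-- ===== Notes on version B (the rewrite author's own statement) =====
-- stated objective: alternative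
-- what changed: A is a recursive depth-first search that threads a score accumulator and the taken_words set through the recursion and sums score**2 at each newly-taken terminal word; B is iterative breadth-first: it grows a frontier of (cell, path, word) triples level by level n-1 times (pruning words not in partial_words), then a separate scoring pass collects the distinct valid not-yet-taken words and returns their count times n**2.
import Mathlib
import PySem

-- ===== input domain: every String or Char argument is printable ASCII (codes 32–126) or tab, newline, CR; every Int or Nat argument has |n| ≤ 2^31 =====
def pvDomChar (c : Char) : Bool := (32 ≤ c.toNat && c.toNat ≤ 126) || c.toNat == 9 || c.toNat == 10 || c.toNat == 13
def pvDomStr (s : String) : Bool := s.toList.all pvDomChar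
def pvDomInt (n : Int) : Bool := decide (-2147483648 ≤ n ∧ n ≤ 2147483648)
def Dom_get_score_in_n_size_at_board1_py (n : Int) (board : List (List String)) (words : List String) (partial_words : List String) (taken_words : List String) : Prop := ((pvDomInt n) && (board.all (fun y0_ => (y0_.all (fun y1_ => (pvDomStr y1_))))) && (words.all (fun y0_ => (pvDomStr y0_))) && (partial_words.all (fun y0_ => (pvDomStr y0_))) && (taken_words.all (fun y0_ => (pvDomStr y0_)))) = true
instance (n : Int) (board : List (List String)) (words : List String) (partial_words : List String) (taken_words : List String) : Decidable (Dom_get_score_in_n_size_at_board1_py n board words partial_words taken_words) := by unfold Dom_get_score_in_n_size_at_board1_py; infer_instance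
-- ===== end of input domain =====

-- B replaces A's accumulator-threading recursive DFS by an iterative breadth-first frontier
-- growth followed by a separate scoring pass (same cost; both Pythons also add the newly
-- scored words to the caller's taken_words set — identical mutation — and this file proves
-- the RETURN values equal).

-- ===== PORT A =====
-- A-side helpers: the DIRECTIONS constant (as a list: the summed result is iteration-order
-- independent), coordinate_outside_of_board, and the board[row][col] access (always guarded
-- by the border check, hence exact under Pre_)
def pvDirs : List (Int × Int) := [(1,0),(0,1),(1,1),(-1,0),(0,-1),(-1,-1),(-1,1),(1,-1)]

def pvOutside (row col : Int) (board : List (List String)) : Bool :=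
  if row < 0 ∨ (board.length : Int) ≤ row then true
  else if col < 0 ∨ ((PySem.List.pyGetD board 0 []).length : Int) ≤ col then true
  else false

def pvCell (board : List (List String)) (row col : Int) : String :=
  PySem.List.pyGetD (PySem.List.pyGetD board row []) col ""

-- termination infrastructure (cited by the decreasing_by of A's mutual DFS recursion):
-- each recursive step adds a fresh coordinate to path_set, and the search only continues
-- from coordinates inside the board
def pvAllCoords (board : List (List String)) : List (Int × Int) :=
  (PySem.List.pyRange 0 board.length 1).flatMap (fun r =>
    (PySem.List.pyRange 0 (PySem.List.pyGetD board 0 []).length 1).map (fun c => (r, c)))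

def pvFree (board : List (List String)) (ps : List (Int × Int)) : Nat :=
  (pvAllCoords board).countP (fun cd => !(ps.contains cd))

lemma pvNotMemOf {α : Type} [BEq α] [LawfulBEq α] {ps : List α} {x : α}
    (hni : ps.contains x = false) : x ∉ ps := by
  rw [List.contains_eq_mem] at hni; simpa using hni

lemma pvAddEq {α : Type} [BEq α] [LawfulBEq α] {ps : List α} {x : α}
    (hni : ps.contains x = false) : PySem.Set.add ps x = ps ++ [x] := by
  unfold PySem.Set.add PySem.Set.contains
  rw [List.contains_eq_mem] at hni ⊢
  simp_all

lemma pvCountP_lt {α : Type} (l : List α) (p q : α → Bool)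
    (hmono : ∀ a ∈ l, p a = true → q a = true) (a : α) (ha : a ∈ l)
    (hp : p a = false) (hq : q a = true) : l.countP p < l.countP q := by
  induction l with
  | nil => cases ha
  | cons x t ih =>
    cases ha with
    | head =>
      have hle := List.countP_mono_left (l := t) (fun b hb => hmono b (List.mem_cons_of_mem _ hb))
      simp [hp, hq]
      omega
    | tail _ ha' =>
      have hlt := ih (fun b hb h => hmono b (List.mem_cons_of_mem _ hb) h) ha'
      simp only [List.countP_cons]
      by_cases hx : p x = true
      · rw [hx, hmono x List.mem_cons_self hx]; omega
      · simp only [Bool.not_eq_true] at hx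
        rw [hx]
        cases h : q x <;> simp <;> omega

lemma pvMem_allCoords {board : List (List String)} {r c : Int}
    (h : pvOutside r c board = false) : (r, c) ∈ pvAllCoords board := by
  unfold pvOutside at h
  split_ifs at h with h1 h2
  simp only [not_or, not_lt, not_le] at h1 h2
  simp only [pvAllCoords, List.mem_flatMap, List.mem_map]
  exact ⟨r, by rw [PySem.List.mem_pyRange_one]; omega, c, by rw [PySem.List.mem_pyRange_one]; omega, rfl⟩

lemma pvFree_add_le (board : List (List String)) (ps : List (Int × Int)) (cd : Int × Int) :
    pvFree board (ps ++ [cd]) ≤ pvFree board ps := by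
  apply List.countP_mono_left
  intro a _ h
  simp only [List.contains_append, Bool.not_eq_true', Bool.or_eq_false_iff] at h ⊢
  exact h.1

lemma pvFree_add_lt {board : List (List String)} {ps : List (Int × Int)} {r c : Int}
    (hin : pvOutside r c board = false) (hni : ps.contains (r, c) = false) :
    pvFree board (ps ++ [(r, c)]) < pvFree board ps := by
  refine pvCountP_lt _ _ _ ?_ (r, c) (pvMem_allCoords hin) ?_ ?_
  · intro a _ h
    simp only [List.contains_append, Bool.not_eq_true', Bool.or_eq_false_iff] at h ⊢
    exact h.1
  · simp
  · simpa using pvNotMemOf hni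

def pvMu (board : List (List String)) (ps : List (Int × Int)) (row col : Int) : Nat :=
  2 * pvFree board ps + (if pvOutside row col board then 0 else 1)

lemma pvMu_add_lt {board : List (List String)} {ps : List (Int × Int)} {r c : Int}
    (hni : ps.contains (r, c) = false) :
    pvMu board (PySem.Set.add ps (r, c)) r c < 2 * pvFree board ps + 1 := by
  rw [pvAddEq hni]
  unfold pvMu
  cases h : pvOutside r c board with
  | false => have := pvFree_add_lt h hni; simp only [Bool.false_eq_true, if_false]; omega
  | true => have := pvFree_add_le board ps (r, c); simp only [if_true]; omega

-- A's recursive helper _helper_get_score_in_n_size_at_board1: threads the score accumulator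
-- and the (mutated) taken_words set; returns (subtree score sum, updated taken_words)
mutual
def pvAHelp (n : Int) (board : List (List String)) (path_set : PySem.Set (Int × Int))
    (row col : Int) (partial_words words : List String) (word : String)
    (taken : PySem.Set String) (score : Int) : Int × PySem.Set String :=
  if h : pvOutside row col board = true then (0, taken)
  else
    let word := word ++ pvCell board row col
    if n = 0 then
      if !(taken.contains word) then
        if words.contains word then (score ^ 2, PySem.Set.add taken word)
        else (0, taken)
      else (0, taken)
    else if !(partial_words.contains word) then (0, taken)
    else pvADirs pvDirs (n - 1) board path_set row col partial_words words word taken (score + 1)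
termination_by 10 * pvMu board path_set row col + 9
decreasing_by
  simp only [pvMu, h, Bool.false_eq_true, if_false, pvDirs, List.length_cons, List.length_nil]
  omega

-- the 'for direction in DIRECTIONS' loop of A's helper (path_set.add then .remove around the
-- recursive call = child searches path_set.add, the remaining directions keep path_set)
def pvADirs (dirs : List (Int × Int)) (n : Int) (board : List (List String))
    (path_set : PySem.Set (Int × Int)) (row col : Int)
    (partial_words words : List String) (word : String)
    (taken : PySem.Set String) (score : Int) : Int × PySem.Set String :=
  match dirs with
  | [] => (0, taken)
  | d :: rest =>
    let nr := row + d.1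
    let nc := col + d.2
    if h : path_set.contains (nr, nc) = true then
      pvADirs rest n board path_set row col partial_words words word taken score
    else
      let r1 := pvAHelp n board (PySem.Set.add path_set (nr, nc)) nr nc partial_words words word taken score
      let r2 := pvADirs rest n board path_set row col partial_words words word r1.2 score
      (r1.1 + r2.1, r2.2)
termination_by 10 * (2 * pvFree board path_set + 1) + dirs.length
decreasing_by
  · simp only [List.length_cons]; omega
  · have h' : path_set.contains (row + d.1, col + d.2) = false := by simpa using h
    have := pvMu_add_lt (board := board) h'
    omega
  · simp only [List.length_cons]; omega
end

def get_score_in_n_size_at_board1_py (n : Int) (board : List (List String))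
    (words : List String) (partial_words : List String) (taken_words : List String) : Int :=
  ((PySem.List.pyRange 0 board.length 1).foldl (fun st sr =>
      (PySem.List.pyRange 0 (PySem.List.pyGetD board 0 []).length 1).foldl (fun st2 sc =>
        let r := pvAHelp (n - 1) board (PySem.Set.ofList [(sr, sc)]) sr sc partial_words words "" st2.2 1
        (st2.1 + r.1, r.2)) st)
      ((0 : Int), PySem.Set.ofList taken_words)).1

-- ===== PORT B =====
-- one breadth-first growth step: every frontier item (position, path, word) whose word is a
-- viable prefix is extended by one fresh in-board neighbour in each of the 8 directions
def pvExpand (board : List (List String)) (partial_words : List String) (rows cols : Int)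
    (frontier : List ((Int × Int) × List (Int × Int) × String)) :
    List ((Int × Int) × List (Int × Int) × String) :=
  frontier.flatMap (fun it =>
    if !(partial_words.contains it.2.2) then []
    else pvDirs.flatMap (fun d =>
      let nr := it.1.1 + d.1
      let nc := it.1.2 + d.2
      if 0 ≤ nr ∧ nr < rows ∧ 0 ≤ nc ∧ nc < cols ∧ ¬ it.2.1.contains (nr, nc) then
        [((nr, nc), it.2.1 ++ [(nr, nc)], it.2.2 ++ pvCell board nr nc)]
      else []))

-- B's 'for _ in range(n - 1)' loop
def pvGrow (k : Nat) (board : List (List String)) (partial_words : List String)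
    (rows cols : Int) (frontier : List ((Int × Int) × List (Int × Int) × String)) :
    List ((Int × Int) × List (Int × Int) × String) :=
  match k with
  | 0 => frontier
  | k + 1 =>
    if frontier.isEmpty then frontier
    else pvGrow k board partial_words rows cols (pvExpand board partial_words rows cols frontier)

def get_score_in_n_size_at_board1_py_alt (n : Int) (board : List (List String))
    (words : List String) (partial_words : List String) (taken_words : List String) : Int :=
  if n < 1 then 0
  else
    let rows : Int := board.length
    let cols : Int := if board.isEmpty then 0 else ((PySem.List.pyGetD board 0 []).length : Int)
    let init := (PySem.List.pyRange 0 rows 1).flatMap (fun r =>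
      (PySem.List.pyRange 0 cols 1).map (fun c => ((r, c), [(r, c)], pvCell board r c)))
    let fin := pvGrow (n - 1).toNat board partial_words rows cols init
    let new := fin.foldl (fun nw it =>
      if words.contains it.2.2 && !(taken_words.contains it.2.2) && !(nw.contains it.2.2)
      then nw ++ [it.2.2] else nw) []
    (new.length : Int) * n * n

-- ===== PRECONDITION & SPEC =====
-- Pre_ admits exactly the inputs where Python A returns: every board row at least as long as
-- row 0 (if board is non-empty, A reads board[r][c] for every 0 ≤ r < len(board) and
-- 0 ≤ c < len(board[0]), so a row shorter than row 0 raises IndexError; an empty board is fine).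
def Pre_get_score_in_n_size_at_board1_py (n : Int) (board : List (List String)) (words : List String) (partial_words : List String) (taken_words : List String) : Prop :=
  ∀ r ∈ board, (PySem.List.pyGetD board 0 []).length ≤ r.length
instance (n : Int) (board : List (List String)) (words : List String) (partial_words : List String) (taken_words : List String) : Decidable (Pre_get_score_in_n_size_at_board1_py n board words partial_words taken_words) := by unfold Pre_get_score_in_n_size_at_board1_py; infer_instance

def pvWitness_get_score_in_n_size_at_board1_py : Int × List (List String) × List String × List String × List String :=
  (2, [["a", "b"]], ["ab"], ["a"], [])

def Spec_get_score_in_n_size_at_board1_py (n : Int) (board : List (List String)) (words : List String) (partial_words : List String) (taken_words : List String) (out : Int) : Prop := out = get_score_in_n_size_at_board1_py_alt n board words partial_words taken_words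
instance (n : Int) (board : List (List String)) (words : List String) (partial_words : List String) (taken_words : List String) (out : Int) : Decidable (Spec_get_score_in_n_size_at_board1_py n board words partial_words taken_words out) := by unfold Spec_get_score_in_n_size_at_board1_py; infer_instance

-- ===== CLAIM (what is proved, stated in full; the proofs are below) =====
def Claim_equal_get_score_in_n_size_at_board1_py : Prop := ∀ (n : Int) (board : List (List String)) (words : List String) (partial_words : List String) (taken_words : List String), Dom_get_score_in_n_size_at_board1_py n board words partial_words taken_words → Pre_get_score_in_n_size_at_board1_py n board words partial_words taken_words → Spec_get_score_in_n_size_at_board1_py n board words partial_words taken_words (get_score_in_n_size_at_board1_py n board words partial_words taken_words)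

-- ===== LEMMAS AND PROOFS =====

-- proof-only helpers -----------------------------------------------------------------------

-- the list, in DFS order, of the valid words readable along a simple path of k further steps
-- from a state whose word already includes the current cell
def pvWordsD (board : List (List String)) (pw ws : List String) :
    Nat → List (Int × Int) → Int → Int → String → List String
  | 0, _, _, _, word => if ws.contains word then [word] else []
  | k + 1, path, r, c, word =>
    if !(pw.contains word) then []
    else pvDirs.flatMap (fun d =>
      let nr := r + d.1
      let nc := c + d.2
      if 0 ≤ nr ∧ nr < (board.length : Int) ∧ 0 ≤ nc ∧
          nc < ((PySem.List.pyGetD board 0 []).length : Int) ∧ ¬ path.contains (nr, nc) then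
        pvWordsD board pw ws k (path ++ [(nr, nc)]) nr nc (word ++ pvCell board nr nc)
      else [])

-- 'take a word if fresh' step: the effect of A's taken_words threading on (count, taken)
def pvTStep (st : Int × List String) (w : String) : Int × List String :=
  if st.2.contains w then st else (st.1 + 1, st.2 ++ [w])

def pvTake (t : List String) (L : List String) : Int × List String :=
  L.foldl pvTStep (0, t)

-- the words of the frontier items that are valid words
def pvTer (ws : List String) (F : List ((Int × Int) × List (Int × Int) × String)) : List String :=
  F.filterMap (fun it => if ws.contains it.2.2 then some it.2.2 else none)

-- the word list produced from one start cell, seen from A's side (outside guard included)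
def pvAW (board : List (List String)) (pw ws : List String) (n : Int)
    (ps : List (Int × Int)) (r c : Int) (word : String) : List String :=
  if pvOutside r c board then []
  else pvWordsD board pw ws n.toNat ps r c (word ++ pvCell board r c)

lemma pvTake_shift (L : List String) : ∀ (a : Int) (t : List String),
    L.foldl pvTStep (a, t) = (a + (pvTake t L).1, (pvTake t L).2) := by
  induction L with
  | nil => intro a t; simp [pvTake]
  | cons w L ih =>
    intro a t
    simp only [List.foldl_cons, pvTake, pvTStep]
    by_cases h : t.contains w = true
    · simp only [h, if_true]
      rw [ih a t, ih 0 t]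
      simp
    · simp only [h, if_false, Bool.false_eq_true]
      rw [ih (a + 1) (t ++ [w]), ih (0 + 1) (t ++ [w])]
      simp only [Prod.mk.injEq]
      exact ⟨by ring, trivial⟩

lemma pvTake_append (t : List String) (L1 L2 : List String) :
    pvTake t (L1 ++ L2)
      = ((pvTake t L1).1 + (pvTake (pvTake t L1).2 L2).1, (pvTake (pvTake t L1).2 L2).2) := by
  unfold pvTake
  rw [List.foldl_append]
  rw [show (List.foldl pvTStep (0, t) L1)
      = ((List.foldl pvTStep (0, t) L1).1, (List.foldl pvTStep (0, t) L1).2) from rfl]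
  rw [pvTake_shift L2 (List.foldl pvTStep (0, t) L1).1 (List.foldl pvTStep (0, t) L1).2]
  rfl

lemma pvOutside_false_iff (board : List (List String)) (r c : Int) :
    pvOutside r c board = false ↔
      (0 ≤ r ∧ r < (board.length : Int) ∧ 0 ≤ c ∧
        c < ((PySem.List.pyGetD board 0 []).length : Int)) := by
  unfold pvOutside
  split_ifs with h1 h2 <;> simp <;> omega

-- A-side characterisation: the DFS with accumulator s and taken set t returns
-- (s+n)^2 · (number of fresh words) and appends exactly the fresh words to t
lemma pvAHelp_words (board : List (List String)) (pw ws : List String) :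
    (∀ (n : Int) (ps : PySem.Set (Int × Int)) (r c : Int) (word : String)
        (taken : PySem.Set String) (score : Int), 0 ≤ n → ∀ (t : List String) (s : Int),
        pvAHelp n board ps r c pw ws word t s
          = ((s + n) ^ 2 * (pvTake t (pvAW board pw ws n ps r c word)).1,
             (pvTake t (pvAW board pw ws n ps r c word)).2))
    ∧ (∀ (dirs : List (Int × Int)) (n : Int) (ps : PySem.Set (Int × Int)) (r c : Int)
        (word : String) (taken : PySem.Set String) (score : Int), 0 ≤ n →
        ∀ (t : List String) (s : Int),
        pvADirs dirs n board ps r c pw ws word t s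
          = ((s + n) ^ 2 * (pvTake t (dirs.flatMap (fun d =>
                if ps.contains (r + d.1, c + d.2) then []
                else pvAW board pw ws n (PySem.Set.add ps (r + d.1, c + d.2)) (r + d.1) (c + d.2) word))).1,
             (pvTake t (dirs.flatMap (fun d =>
                if ps.contains (r + d.1, c + d.2) then []
                else pvAW board pw ws n (PySem.Set.add ps (r + d.1, c + d.2)) (r + d.1) (c + d.2) word))).2)) := by
  apply pvAHelp.mutual_induct board pw ws
    (motive1 := fun n ps r c word taken score => 0 ≤ n → ∀ (t : List String) (s : Int),
        pvAHelp n board ps r c pw ws word t s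
          = ((s + n) ^ 2 * (pvTake t (pvAW board pw ws n ps r c word)).1,
             (pvTake t (pvAW board pw ws n ps r c word)).2))
    (motive2 := fun dirs n ps r c word taken score => 0 ≤ n → ∀ (t : List String) (s : Int),
        pvADirs dirs n board ps r c pw ws word t s
          = ((s + n) ^ 2 * (pvTake t (dirs.flatMap (fun d =>
                if ps.contains (r + d.1, c + d.2) then []
                else pvAW board pw ws n (PySem.Set.add ps (r + d.1, c + d.2)) (r + d.1) (c + d.2) word))).1,
             (pvTake t (dirs.flatMap (fun d =>
                if ps.contains (r + d.1, c + d.2) then []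
                else pvAW board pw ws n (PySem.Set.add ps (r + d.1, c + d.2)) (r + d.1) (c + d.2) word))).2))
  · intro n ps r c word taken score h _ t s
    rw [pvAHelp]
    simp [h, pvAW, pvTake]
  · intro ps r c word taken score h w1 _ _ hge t s
    rw [pvAHelp]
    by_cases hw : (word ++ pvCell board r c) ∈ ws
    · by_cases ht : (word ++ pvCell board r c) ∈ t
      · simp [h, hw, ht, pvAW, pvWordsD, pvTake, pvTStep, PySem.Set.contains, List.contains_eq_mem]
      · simp [h, hw, ht, pvAW, pvWordsD, pvTake, pvTStep, PySem.Set.contains, List.contains_eq_mem]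
    · simp [h, hw, pvAW, pvWordsD, pvTake, PySem.Set.contains, List.contains_eq_mem]
  · intro ps r c word taken score h w1 _ _ hge t s
    rw [pvAHelp]
    by_cases hw : (word ++ pvCell board r c) ∈ ws
    · by_cases ht : (word ++ pvCell board r c) ∈ t
      · simp [h, hw, ht, pvAW, pvWordsD, pvTake, pvTStep, PySem.Set.contains, List.contains_eq_mem]
      · simp [h, hw, ht, pvAW, pvWordsD, pvTake, pvTStep, PySem.Set.contains, List.contains_eq_mem]
    · simp [h, hw, pvAW, pvWordsD, pvTake, PySem.Set.contains, List.contains_eq_mem]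
  · intro ps r c word taken score h w1 _ hge t s
    rw [pvAHelp]
    by_cases hw : (word ++ pvCell board r c) ∈ ws
    · by_cases ht : (word ++ pvCell board r c) ∈ t
      · simp [h, hw, ht, pvAW, pvWordsD, pvTake, pvTStep, PySem.Set.contains, List.contains_eq_mem]
      · simp [h, hw, ht, pvAW, pvWordsD, pvTake, pvTStep, PySem.Set.contains, List.contains_eq_mem]
    · simp [h, hw, pvAW, pvWordsD, pvTake, PySem.Set.contains, List.contains_eq_mem]
  · intro n ps r c word taken score h w1 hn hp hge t s
    rw [pvAHelp]
    simp only [h, Bool.false_eq_true, dite_false, if_neg hn]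
    rw [if_pos hp]
    have hnt : n.toNat = (n.toNat - 1) + 1 := by omega
    unfold pvAW
    rw [if_neg (by simpa using h), hnt]
    simp [pvWordsD, pvTake, (show (word ++ pvCell board r c) ∉ pw by simpa using hp)]
  · intro n ps r c word taken score h w1 hn hp ih hge t s
    have hp' : pw.contains (word ++ pvCell board r c) = true := by simpa using hp
    rw [pvAHelp]
    simp only [h, Bool.false_eq_true, dite_false, if_neg hn]
    rw [if_neg (by simpa using hp')]
    rw [ih (by omega) t (s + 1)]
    have harith : s + 1 + (n - 1) = s + n := by ring
    rw [harith]
    have hW : (pvDirs.flatMap (fun d =>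
        if ps.contains (r + d.1, c + d.2) then []
        else pvAW board pw ws (n - 1) (PySem.Set.add ps (r + d.1, c + d.2)) (r + d.1) (c + d.2)
          (word ++ pvCell board r c)))
        = pvAW board pw ws n ps r c word := by
      unfold pvAW
      rw [if_neg (by simpa using h)]
      have hnt : n.toNat = (n - 1).toNat + 1 := by omega
      rw [hnt]
      simp only [pvWordsD]
      rw [if_neg (by simpa using hp')]
      apply List.flatMap_congr
      intro d _
      by_cases hps : ps.contains (r + d.1, c + d.2) = true
      · rw [if_pos hps, if_neg]
        intro hcond
        exact hcond.2.2.2.2 hps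
      · rw [if_neg hps]
        rw [show PySem.Set.add ps (r + d.1, c + d.2) = ps ++ [(r + d.1, c + d.2)] from
          pvAddEq (by simpa using hps)]
        by_cases ho : pvOutside (r + d.1) (c + d.2) board = true
        · rw [if_pos ho, if_neg]
          intro hcond
          have hfalse := (pvOutside_false_iff board (r + d.1) (c + d.2)).mpr
            ⟨hcond.1, hcond.2.1, hcond.2.2.1, hcond.2.2.2.1⟩
          simp [hfalse] at ho
        · have hb := (pvOutside_false_iff board (r + d.1) (c + d.2)).mp (by simpa using ho)
          rw [if_neg ho, if_pos ⟨hb.1, hb.2.1, hb.2.2.1, hb.2.2.2, hps⟩]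
    rw [hW]
  · intro n ps r c word taken score hge t s
    rw [pvADirs]
    simp [pvTake]
  · intro n ps r c word taken score d rest nr nc hcont ih hge t s
    have hc : ps.contains (r + d.1, c + d.2) = true := hcont
    rw [pvADirs]
    simp only [dif_pos hc]
    rw [ih hge t s]
    simp only [List.flatMap_cons, if_pos hc, List.nil_append]
  · intro n ps r c word taken score d rest nr nc hfresh r1 ih1 ih1' ih2 hge t s
    have hc : ¬ ps.contains (r + d.1, c + d.2) = true := hfresh
    rw [pvADirs]
    simp only [dif_neg hc]
    rw [ih1' hge t s]
    rw [ih2 hge ((pvTake t (pvAW board pw ws n (PySem.Set.add ps (r + d.1, c + d.2)) (r + d.1) (c + d.2) word)).2) s]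
    simp only [List.flatMap_cons]
    rw [show (if ps.contains (r + d.1, c + d.2) then ([] : List String)
        else pvAW board pw ws n (PySem.Set.add ps (r + d.1, c + d.2)) (r + d.1) (c + d.2) word)
        = pvAW board pw ws n (PySem.Set.add ps (r + d.1, c + d.2)) (r + d.1) (c + d.2) word from
      if_neg (by simpa using hc)]
    rw [pvTake_append]
    simp only [Prod.mk.injEq]
    exact ⟨by ring, trivial⟩

-- A returns 0 and leaves taken unchanged when the remaining depth is negative
lemma pvAHelp_neg (board : List (List String)) (pw ws : List String) :
    (∀ (n : Int) (ps : PySem.Set (Int × Int)) (r c : Int) (word : String)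
        (taken : PySem.Set String) (score : Int), n < 0 → ∀ (t : List String) (s : Int),
        pvAHelp n board ps r c pw ws word t s = (0, t))
    ∧ (∀ (dirs : List (Int × Int)) (n : Int) (ps : PySem.Set (Int × Int)) (r c : Int)
        (word : String) (taken : PySem.Set String) (score : Int), n < 0 →
        ∀ (t : List String) (s : Int),
        pvADirs dirs n board ps r c pw ws word t s = (0, t)) := by
  apply pvAHelp.mutual_induct board pw ws
    (motive1 := fun n ps r c word taken score => n < 0 → ∀ (t : List String) (s : Int),
        pvAHelp n board ps r c pw ws word t s = (0, t))
    (motive2 := fun dirs n ps r c word taken score => n < 0 → ∀ (t : List String) (s : Int),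
        pvADirs dirs n board ps r c pw ws word t s = (0, t))
  · intro n ps r c word taken score h _ t s
    rw [pvAHelp]; simp [h]
  · intro ps r c word taken score h w1 hw hlt
    omega
  · intro ps r c word taken score h w1 hw hlt
    omega
  · intro ps r c word taken score h w1 hlt
    omega
  · intro n ps r c word taken score h w1 hn hp _ t s
    rw [pvAHelp]
    simp only [h, Bool.false_eq_true, dite_false, if_neg hn]
    rw [if_pos hp]
  · intro n ps r c word taken score h w1 hn hp ih hlt t s
    rw [pvAHelp]
    simp only [h, Bool.false_eq_true, dite_false, if_neg hn]
    rw [if_neg (by simpa using hp)]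
    exact ih (by omega) t (s + 1)
  · intro n ps r c word taken score _ t s
    rw [pvADirs]
  · intro n ps r c word taken score d rest nr nc hcont ih hlt t s
    have hc : ps.contains (r + d.1, c + d.2) = true := hcont
    rw [pvADirs]
    simp only [dif_pos hc]
    exact ih hlt t s
  · intro n ps r c word taken score d rest nr nc h r1 ih1 ih1' ih2 hlt t s
    have hc : ¬ ps.contains (r + d.1, c + d.2) = true := h
    rw [pvADirs]
    simp only [dif_neg hc]
    rw [ih1' hlt t s, ih2 hlt t s]
    simp

-- B-side: growing distributes over frontier concatenation
-- growth without B's early exit (the exit changes nothing: an empty frontier stays empty)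
def pvGrowP (k : Nat) (board : List (List String)) (partial_words : List String)
    (rows cols : Int) (frontier : List ((Int × Int) × List (Int × Int) × String)) :
    List ((Int × Int) × List (Int × Int) × String) :=
  match k with
  | 0 => frontier
  | k + 1 => pvGrowP k board partial_words rows cols (pvExpand board partial_words rows cols frontier)

lemma pvGrowP_nil (board : List (List String)) (pw : List String) (rows cols : Int)
    (k : Nat) : pvGrowP k board pw rows cols [] = [] := by
  induction k with
  | zero => rfl
  | succ k ih => simpa [pvGrowP, pvExpand] using ih

lemma pvGrow_eq_P (board : List (List String)) (pw : List String) (rows cols : Int)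
    (k : Nat) : ∀ (F : List ((Int × Int) × List (Int × Int) × String)),
    pvGrow k board pw rows cols F = pvGrowP k board pw rows cols F := by
  induction k with
  | zero => intro F; rfl
  | succ k ih =>
    intro F
    by_cases hF : F.isEmpty
    · have hnil : F = [] := by simpa using hF
      subst hnil
      simp [pvGrow, pvGrowP, pvExpand, pvGrowP_nil]
    · simp [pvGrow, pvGrowP, hF, ih]

lemma pvGrowP_append (board : List (List String)) (pw : List String) (rows cols : Int)
    (k : Nat) : ∀ (F1 F2 : List ((Int × Int) × List (Int × Int) × String)),
    pvGrowP k board pw rows cols (F1 ++ F2)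
      = pvGrowP k board pw rows cols F1 ++ pvGrowP k board pw rows cols F2 := by
  induction k with
  | zero => intro F1 F2; simp [pvGrowP]
  | succ k ih =>
    intro F1 F2
    simp only [pvGrowP]
    rw [show pvExpand board pw rows cols (F1 ++ F2)
        = pvExpand board pw rows cols F1 ++ pvExpand board pw rows cols F2 by
      simp [pvExpand, List.flatMap_append]]
    exact ih _ _

lemma pvTer_append (ws : List String) (F1 F2 : List ((Int × Int) × List (Int × Int) × String)) :
    pvTer ws (F1 ++ F2) = pvTer ws F1 ++ pvTer ws F2 := by
  simp [pvTer, List.filterMap_append]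

lemma pvTer_grow_flatMap (board : List (List String)) (pw ws : List String) (rows cols : Int)
    (k : Nat) (F : List ((Int × Int) × List (Int × Int) × String)) :
    pvTer ws (pvGrowP k board pw rows cols F)
      = F.flatMap (fun it => pvTer ws (pvGrowP k board pw rows cols [it])) := by
  induction F with
  | nil =>
    rw [pvGrowP_nil]
    simp [pvTer]
  | cons it F ih =>
    rw [show (it :: F) = [it] ++ F by rfl, pvGrowP_append, pvTer_append, ih]
    simp

-- the valid words at the end of the growth from a single item are exactly the DFS word list
lemma pvGrowP_single (board : List (List String)) (pw ws : List String) (k : Nat) :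
    ∀ (path : List (Int × Int)) (r c : Int) (word : String),
    pvTer ws (pvGrowP k board pw (board.length : Int) ((PySem.List.pyGetD board 0 []).length : Int)
        [((r, c), path, word)])
      = pvWordsD board pw ws k path r c word := by
  induction k with
  | zero =>
    intro path r c word
    by_cases hw : word ∈ ws <;> simp [pvGrowP, pvWordsD, pvTer, hw]
  | succ k ih =>
    intro path r c word
    rw [show pvGrowP (k + 1) board pw (board.length : Int)
          ((PySem.List.pyGetD board 0 []).length : Int) [((r, c), path, word)]
        = pvGrowP k board pw (board.length : Int) ((PySem.List.pyGetD board 0 []).length : Int)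
            (pvExpand board pw (board.length : Int) ((PySem.List.pyGetD board 0 []).length : Int)
              [((r, c), path, word)]) from rfl]
    by_cases hp : pw.contains word = true
    · rw [show pvExpand board pw (board.length : Int) ((PySem.List.pyGetD board 0 []).length : Int)
            [((r, c), path, word)]
          = pvDirs.flatMap (fun d =>
              if 0 ≤ r + d.1 ∧ r + d.1 < (board.length : Int) ∧ 0 ≤ c + d.2 ∧
                  c + d.2 < ((PySem.List.pyGetD board 0 []).length : Int) ∧
                  ¬ path.contains (r + d.1, c + d.2) then
                [((r + d.1, c + d.2), path ++ [(r + d.1, c + d.2)],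
                  word ++ pvCell board (r + d.1) (c + d.2))]
              else []) by
        simp [pvExpand]
        intro hmem
        exact absurd (by simpa using hp) hmem]
      rw [pvTer_grow_flatMap, List.flatMap_assoc]
      rw [show pvWordsD board pw ws (k + 1) path r c word
          = pvDirs.flatMap (fun d =>
              if 0 ≤ r + d.1 ∧ r + d.1 < (board.length : Int) ∧ 0 ≤ c + d.2 ∧
                  c + d.2 < ((PySem.List.pyGetD board 0 []).length : Int) ∧
                  ¬ path.contains (r + d.1, c + d.2) then
                pvWordsD board pw ws k (path ++ [(r + d.1, c + d.2)]) (r + d.1) (c + d.2)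
                  (word ++ pvCell board (r + d.1) (c + d.2))
              else []) by
        simp [pvWordsD]
        intro hmem
        exact absurd (by simpa using hp) hmem]
      apply List.flatMap_congr
      intro d _
      split_ifs with hcond
      · simpa using ih (path ++ [(r + d.1, c + d.2)]) (r + d.1) (c + d.2)
          (word ++ pvCell board (r + d.1) (c + d.2))
      · simp
    · rw [show pvExpand board pw (board.length : Int) ((PySem.List.pyGetD board 0 []).length : Int)
            [((r, c), path, word)] = [] by
        simp [pvExpand]
        intro hmem
        exact absurd hmem (by simpa using hp)]
      rw [show pvWordsD board pw ws (k + 1) path r c word = [] by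
        simp [pvWordsD]
        intro hmem
        exact absurd hmem (by simpa using hp)]
      rw [pvGrowP_nil]
      simp [pvTer]

-- B's scoring fold over frontier items = the same fold over the valid words only
lemma pvScoreFold (ws tw : List String) (F : List ((Int × Int) × List (Int × Int) × String)) :
    ∀ (nw : List String),
    F.foldl (fun nw it =>
        if ws.contains it.2.2 && !(tw.contains it.2.2) && !(nw.contains it.2.2)
        then nw ++ [it.2.2] else nw) nw
      = (pvTer ws F).foldl (fun nw w =>
          if !(tw.contains w) && !(nw.contains w) then nw ++ [w] else nw) nw := by
  induction F with
  | nil => intro nw; simp [pvTer]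
  | cons it F ih =>
    intro nw
    simp only [List.foldl_cons, pvTer, List.filterMap_cons]
    by_cases h : ws.contains it.2.2 = true
    · simp only [h, if_true, Bool.true_and, List.foldl_cons]
      exact ih _
    · simp only [h, if_false, Bool.false_eq_true, Bool.false_and]
      exact ih nw

-- A's fresh-word count over t0 ++ nw = growth of B's new-word list
lemma pvTakeNew (t0 : List String) (L : List String) : ∀ (nw : List String) (a : Int),
    L.foldl pvTStep (a, t0 ++ nw)
      = (a + ((L.foldl (fun nw w =>
            if !(t0.contains w) && !(nw.contains w) then nw ++ [w] else nw) nw).length : Int)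
          - (nw.length : Int),
         t0 ++ L.foldl (fun nw w =>
            if !(t0.contains w) && !(nw.contains w) then nw ++ [w] else nw) nw) := by
  induction L with
  | nil => intro nw a; simp
  | cons w L ih =>
    intro nw a
    simp only [List.foldl_cons, pvTStep, List.contains_append]
    by_cases h0 : t0.contains w = true
    · simp only [h0, Bool.true_or, if_true, Bool.not_true, Bool.false_and, if_false,
        Bool.false_eq_true]
      exact ih nw a
    · simp only [h0, Bool.false_or, Bool.not_false, Bool.true_and]
      by_cases h1 : nw.contains w = true
      · simp only [h1, if_true, Bool.not_true, if_false, Bool.false_eq_true]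
        exact ih nw a
      · simp only [h1, if_false, Bool.not_false, if_true, Bool.false_eq_true]
        rw [show t0 ++ nw ++ [w] = t0 ++ (nw ++ [w]) by simp]
        rw [ih (nw ++ [w]) (a + 1)]
        simp only [Prod.mk.injEq, List.length_append, List.length_cons, List.length_nil]
        exact ⟨by push_cast; ring, trivial⟩

-- folding A's per-start-cell step = one pvTake over the concatenation of the word lists
lemma pvFoldTake {gam : Type} (q : Int) (Wf : gam → List String)
    (f : (Int × List String) → gam → (Int × List String))
    (hf : ∀ (st : Int × List String) (i : gam),
      f st i = (st.1 + q * (pvTake st.2 (Wf i)).1, (pvTake st.2 (Wf i)).2))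
    (I : List gam) : ∀ (σ : Int) (t : List String),
    I.foldl f (σ, t)
      = (σ + q * (pvTake t (I.flatMap Wf)).1, (pvTake t (I.flatMap Wf)).2) := by
  induction I with
  | nil => intro s t; simp [pvTake]
  | cons i I ih =>
    intro s t
    simp only [List.foldl_cons, List.flatMap_cons]
    rw [hf, ih, pvTake_append]
    simp only [Prod.mk.injEq]
    exact ⟨by ring, trivial⟩

lemma pvContainsOfList (tw : List String) (w : String) :
    List.contains (PySem.Set.ofList tw) w = List.contains tw w := by
  rw [List.contains_eq_mem, List.contains_eq_mem]
  simp [PySem.Set.mem_ofList]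

lemma pvTop (n : Int) (board : List (List String)) (ws pw tw : List String) :
    get_score_in_n_size_at_board1_py n board ws pw tw
      = get_score_in_n_size_at_board1_py_alt n board ws pw tw := by
  by_cases hn : n < 1
  · -- n ≤ 0: every start calls A's DFS at negative remaining depth, so A sums only zeros
    unfold get_score_in_n_size_at_board1_py get_score_in_n_size_at_board1_py_alt
    rw [if_pos hn]
    have hstep : ∀ (st : Int × List String) (sr : Int),
        (PySem.List.pyRange 0 ((PySem.List.pyGetD board 0 []).length : Int) 1).foldl
          (fun (st2 : Int × List String) (sc : Int) =>
            let r := pvAHelp (n - 1) board (PySem.Set.ofList [(sr, sc)]) sr sc pw ws "" st2.2 1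
            (st2.1 + r.1, r.2)) st = st := by
      intro st sr
      apply List.foldl_fixed'
      intro sc
      have he := (pvAHelp_neg board pw ws).1 (n - 1) (PySem.Set.ofList [(sr, sc)]) sr sc "" [] 0
        (by omega) st.2 1
      simp [he]
    rw [List.foldl_fixed' (fun sr => hstep ((0 : Int), PySem.Set.ofList tw) sr)]
  · -- 1 ≤ n
    unfold get_score_in_n_size_at_board1_py get_score_in_n_size_at_board1_py_alt
    rw [if_neg hn]
    have hcols : (if board.isEmpty then (0 : Int)
          else ((PySem.List.pyGetD board 0 []).length : Int))
        = ((PySem.List.pyGetD board 0 []).length : Int) := by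
      cases board with
      | nil => simp [PySem.List.pyGetD]
      | cons hd tl => simp
    simp only [hcols]
    -- A side: collapse the two folds into one pvTake over the concatenated word lists
    have hAi : ∀ (sr : Int) (st2 : Int × List String) (sc : Int),
        (fun (st2 : Int × List String) (sc : Int) =>
          let r := pvAHelp (n - 1) board (PySem.Set.ofList [(sr, sc)]) sr sc pw ws "" st2.2 1
          (st2.1 + r.1, r.2)) st2 sc
        = (st2.1 + (1 + (n - 1)) ^ 2
              * (pvTake st2.2 (pvAW board pw ws (n - 1) (PySem.Set.ofList [(sr, sc)]) sr sc "")).1,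
           (pvTake st2.2 (pvAW board pw ws (n - 1) (PySem.Set.ofList [(sr, sc)]) sr sc "")).2) := by
      intro sr st2 sc
      have he := (pvAHelp_words board pw ws).1 (n - 1) (PySem.Set.ofList [(sr, sc)]) sr sc "" [] 0
        (by omega) st2.2 1
      simp only [he]
    have hAo : ∀ (st : Int × List String) (sr : Int),
        (fun (st : Int × List String) (sr : Int) =>
          (PySem.List.pyRange 0 ((PySem.List.pyGetD board 0 []).length : Int) 1).foldl
            (fun (st2 : Int × List String) (sc : Int) =>
              let r := pvAHelp (n - 1) board (PySem.Set.ofList [(sr, sc)]) sr sc pw ws "" st2.2 1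
              (st2.1 + r.1, r.2)) st) st sr
        = (st.1 + (1 + (n - 1)) ^ 2 * (pvTake st.2
              ((PySem.List.pyRange 0 ((PySem.List.pyGetD board 0 []).length : Int) 1).flatMap
                (fun sc => pvAW board pw ws (n - 1) (PySem.Set.ofList [(sr, sc)]) sr sc ""))).1,
           (pvTake st.2
              ((PySem.List.pyRange 0 ((PySem.List.pyGetD board 0 []).length : Int) 1).flatMap
                (fun sc => pvAW board pw ws (n - 1) (PySem.Set.ofList [(sr, sc)]) sr sc ""))).2) := by
      intro st sr
      rw [show st = (st.1, st.2) from rfl]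
      exact pvFoldTake ((1 + (n - 1)) ^ 2) _ _ (hAi sr) _ st.1 st.2
    rw [pvFoldTake ((1 + (n - 1)) ^ 2)
        (fun sr => (PySem.List.pyRange 0 ((PySem.List.pyGetD board 0 []).length : Int) 1).flatMap
          (fun sc => pvAW board pw ws (n - 1) (PySem.Set.ofList [(sr, sc)]) sr sc ""))
        _ hAo (PySem.List.pyRange 0 (board.length : Int) 1) 0 (PySem.Set.ofList tw)]
    -- B side: the scoring fold over the grown frontier = the fold over the word lists
    rw [pvGrow_eq_P]
    rw [pvScoreFold ws tw _ [], pvTer_grow_flatMap]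
    simp only [List.flatMap_assoc, List.flatMap_map, pvGrowP_single]
    -- the two nested word-list tables agree start cell by start cell
    have hWall : (PySem.List.pyRange 0 (board.length : Int) 1).flatMap
        (fun sr => (PySem.List.pyRange 0 ((PySem.List.pyGetD board 0 []).length : Int) 1).flatMap
          (fun sc => pvAW board pw ws (n - 1) (PySem.Set.ofList [(sr, sc)]) sr sc ""))
        = (PySem.List.pyRange 0 (board.length : Int) 1).flatMap
        (fun sr => (PySem.List.pyRange 0 ((PySem.List.pyGetD board 0 []).length : Int) 1).flatMap
          (fun sc => pvWordsD board pw ws (n - 1).toNat [(sr, sc)] sr sc (pvCell board sr sc))) := by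
      apply List.flatMap_congr
      intro sr hsr
      apply List.flatMap_congr
      intro sc hsc
      rw [PySem.List.mem_pyRange_one] at hsr hsc
      unfold pvAW
      rw [if_neg (by
        have hf : pvOutside sr sc board = false := (pvOutside_false_iff board sr sc).mpr
          (by constructor <;> omega)
        simp [hf])]
      rw [show PySem.Set.ofList [(sr, sc)] = [(sr, sc)] by
        simp [PySem.Set.ofList, PySem.Set.add, PySem.Set.contains]]
      rw [String.empty_append]
    rw [hWall]
    -- count the fresh words once on each side
    have htake := pvTakeNew (PySem.Set.ofList tw)
      ((PySem.List.pyRange 0 (board.length : Int) 1).flatMap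
        (fun sr => (PySem.List.pyRange 0 ((PySem.List.pyGetD board 0 []).length : Int) 1).flatMap
          (fun sc => pvWordsD board pw ws (n - 1).toNat [(sr, sc)] sr sc (pvCell board sr sc)))) [] 0
    rw [List.append_nil] at htake
    simp only [pvContainsOfList] at htake
    unfold pvTake
    rw [htake]
    simp only [List.length_nil]
    push_cast
    ring

theorem pvWitness_ok :
    Dom_get_score_in_n_size_at_board1_py (pvWitness_get_score_in_n_size_at_board1_py.1) (pvWitness_get_score_in_n_size_at_board1_py.2.1) (pvWitness_get_score_in_n_size_at_board1_py.2.2.1) (pvWitness_get_score_in_n_size_at_board1_py.2.2.2.1) (pvWitness_get_score_in_n_size_at_board1_py.2.2.2.2) ∧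
    Pre_get_score_in_n_size_at_board1_py (pvWitness_get_score_in_n_size_at_board1_py.1) (pvWitness_get_score_in_n_size_at_board1_py.2.1) (pvWitness_get_score_in_n_size_at_board1_py.2.2.1) (pvWitness_get_score_in_n_size_at_board1_py.2.2.2.1) (pvWitness_get_score_in_n_size_at_board1_py.2.2.2.2) := by
  decide

-- ===== VERDICT (by name: the statement is the Claim_ definition above) =====
theorem get_score_in_n_size_at_board1_py_spec : Claim_equal_get_score_in_n_size_at_board1_py := by
  intro n board words partial_words taken_words _ _
  unfold Spec_get_score_in_n_size_at_board1_py
  exact pvTop n board words partial_words taken_words
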